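-- pv_equiv track=rewrite | github.com/aria-ml/dataeval | src/dataeval/utils/data/metadata.py | _get_key_indices
-- ===== SOURCE A (Python) =====
-- from collections.abc import Iterable, Mapping, Sequence
--
-- def _get_key_indices(keys: Iterable[tuple[str, ...]]) -> dict[tuple[str, ...], int]:
--     """
--     Finds indices to minimize unique tuple keys
--
--     Parameters
--     ----------
--     keys : Iterable[tuple[str, ...]]
--         Collection of unique expanded tuple keys
--
--     Returns
--     -------
--     dict[tuple[str, ...], int]
--         Mapping of tuple keys to starting index
--     """
--     indices = dict.fromkeys(keys, -1)
--     ks = list(keys)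
--     while len(ks) > 0:
--         seen: dict[tuple[str, ...], list[tuple[str, ...]]] = {}
--         for k in ks:
--             seen.setdefault(k[indices[k] :], []).append(k)
--         ks.clear()
--         for sk in seen.values():
--             if len(sk) > 1:
--                 ks.extend(sk)
--                 for k in sk:
--                     indices[k] -= 1
--     return indices
-- ===== SOURCE B (Python) =====
-- def _get_key_indices(keys):
--     """Closed form: each key's index is -(1 + longest common suffix with any other key)."""
--     ks = list(keys)
--
--     def _common(a, b):
--         return 1 + _common(a[1:], b[1:]) if a and b and a[0] == b[0] else 0
--
--     return {
--         k: -1 - max((_common(k[::-1], j[::-1]) for j in ks if j != k), default=0)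
--         for k in ks
--     }
-- ===== Notes on version B (the rewrite author's own statement) =====
-- stated objective: simpler
-- what changed: A iteratively regroups the keys by progressively longer suffixes until every group is a singleton, decrementing each key's index once per round; B computes the same dict in one shot from the closed form index(k) = -(1 + longest common suffix of k with any other key). Pre_ excludes lists with duplicate keys, on which A's while loop never terminates.
import Mathlib
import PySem

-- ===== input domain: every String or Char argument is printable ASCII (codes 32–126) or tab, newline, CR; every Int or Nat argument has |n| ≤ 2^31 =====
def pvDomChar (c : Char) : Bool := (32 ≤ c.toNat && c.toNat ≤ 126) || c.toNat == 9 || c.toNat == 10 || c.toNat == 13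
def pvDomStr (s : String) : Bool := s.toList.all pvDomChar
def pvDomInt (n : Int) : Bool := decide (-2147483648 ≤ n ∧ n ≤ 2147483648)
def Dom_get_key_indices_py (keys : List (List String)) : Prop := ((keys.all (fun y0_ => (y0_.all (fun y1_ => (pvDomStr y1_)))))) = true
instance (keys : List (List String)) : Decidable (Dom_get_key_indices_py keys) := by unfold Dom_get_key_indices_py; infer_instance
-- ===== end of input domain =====

-- B replaces A's round-based suffix-refinement loop by a closed form (index = -(1 + longest
-- common suffix with any other key)): simpler, no fixpoint iteration; equivalence proved on
-- duplicate-free key lists (on duplicates A's while loop never terminates).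

-- ===== PORT A =====
-- fuel bound for A's while loop: on duplicate-free input the loop runs at most maxLenA+1 rounds (proved below)
def maxLenA (keys : List (List String)) : Nat :=
  keys.foldl (fun a k => max a k.length) 0

-- 'seen = {}; for k in ks: seen.setdefault(k[indices[k]:], []).append(k)'
def aSeen (indices : PySem.Dict (List String) Int) (ks : List (List String)) :
    PySem.Dict (List String) (List (List String)) :=
  ks.foldl (fun s k =>
      s.modify (PySem.List.slice k (some (indices.getD k 0)) none) [] (fun g => g ++ [k]))
    PySem.Dict.empty

-- one iteration of the while body: returns the new ks and the updated indices
def aRound (indices : PySem.Dict (List String) Int) (ks : List (List String)) :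
    List (List String) × PySem.Dict (List String) Int :=
  (aSeen indices ks).values.foldl
    (fun p sk =>
      if 1 < sk.length then
        (p.1 ++ sk, sk.foldl (fun d k => d.modify k 0 (fun v => v - 1)) p.2)
      else p)
    ([], indices)

-- 'while len(ks) > 0: …' (fuel makes the loop total; never exhausted under Pre_)
def aLoop : Nat → List (List String) → PySem.Dict (List String) Int →
    PySem.Dict (List String) Int
  | _, [], indices => indices
  | 0, _ :: _, indices => indices
  | fuel + 1, k0 :: ks, indices =>
      aLoop fuel (aRound indices (k0 :: ks)).1 (aRound indices (k0 :: ks)).2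

def get_key_indices_py (keys : List (List String)) : List (List String × Int) :=
  (aLoop (maxLenA keys + 2) keys
    (keys.foldl (fun d k => d.insert k (-1 : Int)) PySem.Dict.empty)).items

-- ===== PORT B =====
-- '_common(a, b) = 1 + _common(a[1:], b[1:]) if a and b and a[0] == b[0] else 0'
def commonB : List String → List String → Nat
  | a :: as, b :: bs => if a = b then 1 + commonB as bs else 0
  | _, _ => 0

-- '{k: -1 - max((_common(k[::-1], j[::-1]) for j in ks if j != k), default=0) for k in ks}'
-- (k[::-1] is List.reverse: PySem.List.slice?_none_none_neg_one)
def get_key_indices_py_alt (keys : List (List String)) : List (List String × Int) :=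
  (keys.foldl (fun d k =>
      d.insert k
        (-1 - (((keys.filter (fun j => decide (j ≠ k))).map
            (fun j => (commonB k.reverse j.reverse : Int))).foldl max 0)))
    PySem.Dict.empty).items

-- ===== PRECONDITION & SPEC =====
-- Pre_ excludes lists with duplicate keys: there A's while loop never terminates (no value is returned).
def Pre_get_key_indices_py (keys : List (List String)) : Prop := keys.Nodup
instance (keys : List (List String)) : Decidable (Pre_get_key_indices_py keys) := by
  unfold Pre_get_key_indices_py; infer_instance

def pvWitness_get_key_indices_py : List (List String) := [["a"], ["b", "a"], ["c"]]

def Spec_get_key_indices_py (keys : List (List String)) (out : List (List String × Int)) : Prop :=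
  out = get_key_indices_py_alt keys
instance (keys : List (List String)) (out : List (List String × Int)) :
    Decidable (Spec_get_key_indices_py keys out) := by
  unfold Spec_get_key_indices_py; infer_instance

-- ===== CLAIM (what is proved, stated in full; the proofs are below) =====
def Claim_equal_get_key_indices_py : Prop :=
  ∀ (keys : List (List String)), Dom_get_key_indices_py keys →
    Pre_get_key_indices_py keys →
      Spec_get_key_indices_py keys (get_key_indices_py keys)

-- ===== LEMMAS AND PROOFS =====

-- the spec-side quantities: Sfx t k = k[-t:] (clamped suffix of length t),
-- MxN keys k = the longest common suffix of k with any other key of keys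
def Sfx (t : Nat) (k : List String) : List String := k.drop (k.length - t)

def MxN (keys : List (List String)) (k : List String) : Nat :=
  ((keys.filter (fun j => decide (j ≠ k))).map (fun j => commonB k.reverse j.reverse)).foldl max 0

def grpOf (t : Nat) (ks : List (List String)) (c : List String) : List (List String) :=
  ks.filter (fun k => Sfx t k == c)

-- A's loop invariant at round u (u = 0,1,2,…; the round groups by suffixes of length u+1):
-- ks holds exactly the keys still colliding at depth u, indices holds -(u+1) for them and
-- the final value -(1 + MxN) for all the others.
def InvA (keys : List (List String)) (u : Nat) (ks : List (List String))
    (d : PySem.Dict (List String) Int) : Prop :=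
  ks.Nodup ∧
  (∀ k, k ∈ ks ↔ (k ∈ keys ∧ u ≤ MxN keys k)) ∧
  d.keys = keys ∧
  (∀ k ∈ keys, d.getD k 0 =
    if u ≤ MxN keys k then -((u : Int) + 1) else -1 - (MxN keys k : Int))

lemma commonB_comm : ∀ a b : List String, commonB a b = commonB b a := by
  intro a
  induction a with
  | nil => intro b; cases b <;> simp [commonB]
  | cons x as ih =>
    intro b
    cases b with
    | nil => simp [commonB]
    | cons y bs =>
      by_cases h : x = y
      · subst h; simp [commonB, ih]
      · simp [commonB, h, Ne.symm h]

lemma commonB_le_right : ∀ a b : List String, commonB a b ≤ b.length := by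
  intro a
  induction a with
  | nil => intro b; cases b <;> simp [commonB]
  | cons x as ih =>
    intro b
    cases b with
    | nil => simp [commonB]
    | cons y bs =>
      by_cases h : x = y <;> simp [commonB, h]
      have := ih bs; omega

lemma take_eq_of_le_commonB : ∀ (a b : List String) (t : Nat), t ≤ commonB a b →
    a.take t = b.take t := by
  intro a
  induction a with
  | nil =>
    intro b t h
    cases b <;> simp [commonB] at h <;> simp [h]
  | cons x as ih =>
    intro b t h
    cases b with
    | nil => simp [commonB] at h; simp [h]
    | cons y bs =>
      by_cases hxy : x = y
      · subst hxy
        simp [commonB] at h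
        cases t with
        | zero => simp
        | succ s => simp [List.take_succ_cons]; exact ih bs s (by omega)
      · simp [commonB, hxy] at h; simp [h]

lemma le_commonB_of_take_eq : ∀ (a b : List String) (t : Nat), a ≠ b →
    a.take t = b.take t → t ≤ commonB a b := by
  intro a
  induction a with
  | nil =>
    intro b t hne h
    cases b with
    | nil => exact absurd rfl hne
    | cons y bs =>
      cases t with
      | zero => omega
      | succ s => simp at h
  | cons x as ih =>
    intro b t hne h
    cases t with
    | zero => omega
    | succ s =>
      cases b with
      | nil => simp at h
      | cons y bs =>
        simp [List.take_succ_cons] at h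
        obtain ⟨hxy, hts⟩ := h
        subst hxy
        simp [commonB]
        by_cases hab : as = bs
        · subst hab; exact absurd rfl hne
        · have := ih bs s hab hts; omega

lemma sfx_eq_reverse_take (t : Nat) (k : List String) :
    Sfx t k = (k.reverse.take t).reverse := by
  simp [Sfx, List.take_reverse]

lemma sfx_eq_iff (k j : List String) (hne : k ≠ j) (t : Nat) :
    Sfx t k = Sfx t j ↔ t ≤ commonB k.reverse j.reverse := by
  rw [sfx_eq_reverse_take, sfx_eq_reverse_take, List.reverse_inj]
  constructor
  · intro h
    exact le_commonB_of_take_eq _ _ _ (fun hc => hne (by simpa [List.reverse_inj] using hc)) h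
  · intro h
    exact take_eq_of_le_commonB _ _ _ h

lemma le_MxN {keys : List (List String)} {j k : List String} (hj : j ∈ keys) (hne : j ≠ k) :
    commonB k.reverse j.reverse ≤ MxN keys k := by
  unfold MxN
  rw [List.foldl_map]
  exact (PySem.List.le_foldl_max_nat (keys.filter (fun j => decide (j ≠ k)))
    (fun j => commonB k.reverse j.reverse) 0).2 j (by simp [List.mem_filter, hj, hne])

lemma MxN_attained {keys : List (List String)} {k : List String} (h : 0 < MxN keys k) :
    ∃ j ∈ keys, j ≠ k ∧ commonB k.reverse j.reverse = MxN keys k := by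
  rcases PySem.List.foldl_max_mem
      (((keys.filter (fun j => decide (j ≠ k))).map (fun j => commonB k.reverse j.reverse))) 0 with
    h0 | hmem
  · exfalso; unfold MxN at h; omega
  · rcases List.mem_map.mp hmem with ⟨j, hjf, hval⟩
    rcases List.mem_filter.mp hjf with ⟨hjk, hne⟩
    exact ⟨j, hjk, by simpa using hne, hval⟩

lemma MxN_le_maxLenA (keys : List (List String)) (k : List String) :
    MxN keys k ≤ maxLenA keys := by
  rcases PySem.List.foldl_max_mem
      (((keys.filter (fun j => decide (j ≠ k))).map (fun j => commonB k.reverse j.reverse))) 0 with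
    h0 | hmem
  · unfold MxN; omega
  · rcases List.mem_map.mp hmem with ⟨j, hjf, hval⟩
    rcases List.mem_filter.mp hjf with ⟨hjk, _⟩
    unfold MxN
    rw [← hval]
    calc commonB k.reverse j.reverse ≤ j.reverse.length := commonB_le_right _ _
    _ = j.length := by simp
    _ ≤ maxLenA keys := (PySem.List.le_foldl_max_nat keys List.length 0).2 j hjk

lemma foldl_max_cast : ∀ (l : List Nat) (a : Nat),
    List.foldl max ((a : Int)) (l.map (fun n : Nat => (n : Int))) = ((l.foldl max a : Nat) : Int) := by
  intro l
  induction l with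
  | nil => intro a; simp
  | cons n l ih =>
    intro a
    simp only [List.map_cons, List.foldl_cons]
    rw [← Nat.cast_max]
    exact ih (max a n)

lemma one_lt_length_of_mem_ne {α : Type} {l : List α} {x y : α}
    (hx : x ∈ l) (hy : y ∈ l) (h : x ≠ y) : 1 < l.length := by
  rcases l with _ | ⟨a, _ | ⟨b, t⟩⟩
  · simp at hx
  · exact absurd ((List.mem_singleton.mp hx).trans (List.mem_singleton.mp hy).symm) h
  · simp only [List.length_cons]; omega

lemma exists_ne_of_one_lt {α : Type} {l : List α} {x : α}
    (hnd : l.Nodup) (_hx : x ∈ l) (h : 1 < l.length) : ∃ y ∈ l, y ≠ x := by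
  by_contra hc
  push Not at hc
  have hrep := List.eq_replicate_of_mem hc
  rw [hrep] at hnd
  rw [List.nodup_replicate] at hnd
  omega

-- items of the initial/fresh insert folds
lemma fresh_insert_items (keys : List (List String)) (hnd : keys.Nodup)
    (v : List String → Int) :
    (keys.foldl (fun d k => d.insert k (v k)) PySem.Dict.empty).items =
      keys.map (fun k => (k, v k)) := by
  rw [PySem.Dict.items_foldl_insert_fresh keys (fun a => a) v PySem.Dict.empty
    (by intro a _; simp) (by simpa using hnd)]
  rfl

lemma alt_eq (keys : List (List String)) (hnd : keys.Nodup) :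
    get_key_indices_py_alt keys = keys.map (fun k => (k, -1 - (MxN keys k : Int))) := by
  unfold get_key_indices_py_alt
  rw [fresh_insert_items keys hnd]
  apply List.map_congr_left
  intro k _
  congr 1
  unfold MxN
  rw [show ((keys.filter (fun j => decide (j ≠ k))).map
      (fun j => (commonB k.reverse j.reverse : Int))) =
      (((keys.filter (fun j => decide (j ≠ k))).map
        (fun j => commonB k.reverse j.reverse)).map (fun n : Nat => (n : Int))) by
    simp [List.map_map, Function.comp_def]]
  rw [show (0 : Int) = ((0 : Nat) : Int) by simp, foldl_max_cast]

-- the seen dict of one round, characterized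
lemma aSeen_eq (d : PySem.Dict (List String) Int) (ks : List (List String)) (t : Nat)
    (ht : 0 < t) (hv : ∀ k ∈ ks, d.getD k 0 = -((t : Nat) : Int)) :
    aSeen d ks =
      ks.foldl (fun s k => s.modify (Sfx t k) [] (fun g => g ++ [k])) PySem.Dict.empty := by
  unfold aSeen
  apply PySem.List.foldl_congr_mem
  intro acc k hk
  rw [hv k hk, PySem.List.slice_from_neg_natCast k t ht]
  rfl

lemma seenFold_getD (ks : List (List String)) (t : Nat) (c : List String) :
    (ks.foldl (fun s k => s.modify (Sfx t k) [] (fun g => g ++ [k]))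
        (PySem.Dict.empty : PySem.Dict (List String) (List (List String)))).getD c [] =
      grpOf t ks c := by
  have h1 : (ks.foldl (fun s k => s.modify (Sfx t k) [] (fun g => g ++ [k]))
        (PySem.Dict.empty : PySem.Dict (List String) (List (List String)))) =
      ((ks.map (fun k => (Sfx t k, k))).foldl
        (fun d p => d.modify p.1 [] (fun g => g ++ [p.2])) PySem.Dict.empty) :=
    (List.foldl_map (f := fun k : List String => (Sfx t k, k))
      (g := fun (d : PySem.Dict (List String) (List (List String)))
          (p : List String × List String) => d.modify p.1 [] (fun g => g ++ [p.2]))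
      (l := ks) (init := PySem.Dict.empty)).symm
  rw [h1, PySem.Dict.getD_foldl_modify_append]
  simp [grpOf, List.filter_map, List.map_map, Function.comp_def]

lemma seenFold_keys (ks : List (List String)) (t : Nat) :
    (ks.foldl (fun s k => s.modify (Sfx t k) [] (fun g => g ++ [k]))
        (PySem.Dict.empty : PySem.Dict (List String) (List (List String)))).keys =
      PySem.Set.ofList (ks.map (Sfx t)) := by
  rw [PySem.Dict.keys_foldl_modify_key ks (fun k => Sfx t k) [] (fun _ k => (fun g => g ++ [k]))]
  simp [PySem.Set.update_nil_left]

lemma seenFold_values (ks : List (List String)) (t : Nat) :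
    (ks.foldl (fun s k => s.modify (Sfx t k) [] (fun g => g ++ [k]))
        (PySem.Dict.empty : PySem.Dict (List String) (List (List String)))).values =
      (PySem.Set.ofList (ks.map (Sfx t))).map (fun c => grpOf t ks c) := by
  set s := ks.foldl (fun s k => s.modify (Sfx t k) [] (fun g => g ++ [k]))
      (PySem.Dict.empty : PySem.Dict (List String) (List (List String))) with hs
  have hk : s.keys = PySem.Set.ofList (ks.map (Sfx t)) := seenFold_keys ks t
  have hnd : s.keys.Nodup := by rw [hk]; exact PySem.Set.nodup_ofList _
  have := PySem.Dict.values_eq_map_keys s hnd []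
  rw [this, hk]
  apply List.map_congr_left
  intro c _
  exact seenFold_getD ks t c

lemma mem_grpOf (t : Nat) (ks : List (List String)) (c k' : List String) :
    k' ∈ grpOf t ks c ↔ (k' ∈ ks ∧ Sfx t k' = c) := by
  simp [grpOf, List.mem_filter]

-- decrement fold on the dict
lemma getD_foldl_modify_sub_one :
    ∀ (ns : List (List String)) (d : PySem.Dict (List String) Int) (k' : List String),
      (ns.foldl (fun d k => d.modify k 0 (fun v => v - 1)) d).getD k' 0 =
        d.getD k' 0 - (ns.count k' : Int) := by
  intro ns
  induction ns with
  | nil => intro d k'; simp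
  | cons k ns ih =>
    intro d k'
    simp only [List.foldl_cons, ih, List.count_cons]
    rw [PySem.Dict.getD_modify]
    by_cases h : k' = k
    · subst h; simp; ring
    · have h' : ¬ k = k' := fun hc => h hc.symm
      simp [h, h']

-- one round preserves the invariant, advancing the depth by one
lemma round_inv (keys : List (List String)) (u : Nat) (ks : List (List String))
    (d : PySem.Dict (List String) Int) (h : InvA keys u ks d) :
    InvA keys (u + 1) (aRound d ks).1 (aRound d ks).2 := by
  obtain ⟨hnd, hmem, hkeys, hval⟩ := h
  have hksub : ∀ k ∈ ks, k ∈ keys := fun k hk => ((hmem k).mp hk).1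
  have hvks : ∀ k ∈ ks, d.getD k 0 = -(((u + 1 : Nat)) : Int) := by
    intro k hk
    obtain ⟨hkk, hu⟩ := (hmem k).mp hk
    rw [hval k hkk, if_pos hu]
    push_cast; ring
  have hseen : aSeen d ks =
      ks.foldl (fun s k => s.modify (Sfx (u+1) k) [] (fun g => g ++ [k])) PySem.Dict.empty :=
    aSeen_eq d ks (u+1) (by omega) hvks
  have hV : (aSeen d ks).values =
      (PySem.Set.ofList (ks.map (Sfx (u+1)))).map (fun c => grpOf (u+1) ks c) := by
    rw [hseen]; exact seenFold_values ks (u+1)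
  set sfxs := PySem.Set.ofList (ks.map (Sfx (u+1))) with hsfxs
  set V := sfxs.map (fun c => grpOf (u+1) ks c) with hVdef
  -- split the two accumulators of the values loop
  have hsplit : V.foldl
      (fun p sk => if 1 < sk.length then
          (p.1 ++ sk, sk.foldl (fun d k => d.modify k 0 (fun v => v - 1)) p.2)
        else p) ([], d) =
      (V.foldl (fun acc sk => if 1 < sk.length then acc ++ sk else acc) [],
       V.foldl (fun dd sk => if 1 < sk.length then
          sk.foldl (fun d k => d.modify k 0 (fun v => v - 1)) dd else dd) d) := by
    rw [PySem.List.foldl_congr_mem V _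
      (fun p sk => ((fun acc sk => if 1 < sk.length then acc ++ sk else acc) p.1 sk,
        (fun dd sk => if 1 < sk.length then
          sk.foldl (fun d k => d.modify k 0 (fun v => v - 1)) dd else dd) p.2 sk)) ([], d)
      (by intro acc x _; by_cases hl : 1 < x.length <;> simp [hl])]
    exact PySem.List.foldl_prod_mk
      (fun acc sk => if 1 < sk.length then acc ++ sk else acc)
      (fun dd sk => if 1 < sk.length then
        sk.foldl (fun d k => d.modify k 0 (fun v => v - 1)) dd else dd) V [] d
  set newKs := V.foldl (fun acc sk => if 1 < sk.length then acc ++ sk else acc) [] with hnew0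
  have hnewKs : newKs = V.flatMap (fun sk => if 1 < sk.length then sk else []) := by
    rw [hnew0, PySem.List.foldl_congr_mem V _
      (fun acc sk => acc ++ (if 1 < sk.length then sk else [])) []
      (by intro acc x _; by_cases hl : 1 < x.length <;> simp [hl]),
      PySem.List.foldl_append_eq_flatMap]
    simp
  have hd2 : V.foldl (fun dd sk => if 1 < sk.length then
      sk.foldl (fun d k => d.modify k 0 (fun v => v - 1)) dd else dd) d =
      newKs.foldl (fun d k => d.modify k 0 (fun v => v - 1)) d := by
    rw [hnewKs, List.foldl_flatMap]
    apply PySem.List.foldl_congr_mem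
    intro acc x _
    by_cases hl : 1 < x.length <;> simp [hl]
  have hr : aRound d ks = (newKs,
      V.foldl (fun dd sk => if 1 < sk.length then
        sk.foldl (fun d k => d.modify k 0 (fun v => v - 1)) dd else dd) d) := by
    unfold aRound
    rw [hV, hsplit]
  -- membership in newKs
  have hmemNew : ∀ k', k' ∈ newKs ↔
      (k' ∈ ks ∧ 1 < (grpOf (u+1) ks (Sfx (u+1) k')).length) := by
    intro k'
    rw [hnewKs, List.mem_flatMap]
    constructor
    · rintro ⟨sk, hskV, hk'⟩
      rw [hVdef] at hskV
      rcases List.mem_map.mp hskV with ⟨c, _, rfl⟩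
      by_cases hl : 1 < (grpOf (u+1) ks c).length
      · rw [if_pos hl] at hk'
        obtain ⟨hkks, hsfx⟩ := (mem_grpOf _ _ _ _).mp hk'
        exact ⟨hkks, by rw [hsfx]; exact hl⟩
      · rw [if_neg hl] at hk'; simp at hk'
    · rintro ⟨hkks, hl⟩
      refine ⟨grpOf (u+1) ks (Sfx (u+1) k'), ?_, ?_⟩
      · rw [hVdef]
        exact List.mem_map.mpr ⟨Sfx (u+1) k',
          (PySem.Set.mem_ofList _ _).mpr (List.mem_map.mpr ⟨k', hkks, rfl⟩), rfl⟩
      · rw [if_pos hl]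
        exact (mem_grpOf _ _ _ _).mpr ⟨hkks, rfl⟩
  -- a key's group is big iff it still collides at depth u+1
  have hbig : ∀ k' ∈ ks,
      (1 < (grpOf (u+1) ks (Sfx (u+1) k')).length ↔ (u+1) ≤ MxN keys k') := by
    intro k' hk'
    have hgnd : (grpOf (u+1) ks (Sfx (u+1) k')).Nodup := List.Nodup.filter _ hnd
    have hkin : k' ∈ grpOf (u+1) ks (Sfx (u+1) k') := (mem_grpOf _ _ _ _).mpr ⟨hk', rfl⟩
    constructor
    · intro hl
      obtain ⟨j, hjg, hjne⟩ := exists_ne_of_one_lt hgnd hkin hl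
      obtain ⟨hjks, hjsfx⟩ := (mem_grpOf _ _ _ _).mp hjg
      have hcom : (u+1) ≤ commonB k'.reverse j.reverse :=
        (sfx_eq_iff k' j (Ne.symm hjne) (u+1)).mp hjsfx.symm
      exact le_trans hcom (le_MxN (hksub j hjks) hjne)
    · intro hle
      obtain ⟨j, hjkeys, hjne, hjcom⟩ := MxN_attained (lt_of_lt_of_le (by omega) hle)
      have hjks : j ∈ ks := by
        refine (hmem j).mpr ⟨hjkeys, ?_⟩
        have h1 : commonB j.reverse k'.reverse ≤ MxN keys j :=
          le_MxN (hksub k' hk') (Ne.symm hjne)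
        rw [commonB_comm] at h1
        omega
      have hsfx : Sfx (u+1) k' = Sfx (u+1) j :=
        (sfx_eq_iff k' j (Ne.symm hjne) (u+1)).mpr (by omega)
      have hjg : j ∈ grpOf (u+1) ks (Sfx (u+1) k') :=
        (mem_grpOf _ _ _ _).mpr ⟨hjks, hsfx.symm⟩
      exact one_lt_length_of_mem_ne hkin hjg (Ne.symm hjne)
  have hmemNew' : ∀ k', k' ∈ newKs ↔ (k' ∈ keys ∧ (u+1) ≤ MxN keys k') := by
    intro k'
    rw [hmemNew k']
    constructor
    · rintro ⟨hkks, hl⟩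
      exact ⟨hksub k' hkks, (hbig k' hkks).mp hl⟩
    · rintro ⟨hkkeys, hle⟩
      have hkks : k' ∈ ks := (hmem k').mpr ⟨hkkeys, by omega⟩
      exact ⟨hkks, (hbig k' hkks).mpr hle⟩
  -- newKs has no duplicates
  have hgifmem : ∀ (c x : List String),
      x ∈ (if 1 < (grpOf (u+1) ks c).length then grpOf (u+1) ks c else []) →
        Sfx (u+1) x = c := by
    intro c x hx
    by_cases hl : 1 < (grpOf (u+1) ks c).length
    · rw [if_pos hl] at hx; exact ((mem_grpOf _ _ _ _).mp hx).2
    · rw [if_neg hl] at hx; simp at hx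
  have hnewnd : newKs.Nodup := by
    rw [hnewKs, List.nodup_flatMap]
    constructor
    · intro sk hsk
      rw [hVdef] at hsk
      rcases List.mem_map.mp hsk with ⟨c, _, rfl⟩
      by_cases hl : 1 < (grpOf (u+1) ks c).length
      · rw [if_pos hl]; exact List.Nodup.filter _ hnd
      · rw [if_neg hl]; exact List.nodup_nil
    · rw [hVdef, List.pairwise_map]
      have hsnd : sfxs.Nodup := PySem.Set.nodup_ofList _
      refine List.Pairwise.imp ?_ hsnd
      intro c c' hne
      simp only [Function.onFun]
      intro x hx hx'
      exact hne ((hgifmem c x hx).symm.trans (hgifmem c' x hx'))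
  -- the updated dict
  have hd'keys : (newKs.foldl (fun d k => d.modify k 0 (fun v => v - 1)) d).keys = keys := by
    rw [PySem.Dict.keys_foldl_modify_key newKs (fun k => k) 0 (fun _ _ => (fun v => v - 1)) d,
      hkeys]
    have hmapid : newKs.map (fun k => k) = newKs := by simp
    rw [hmapid, PySem.Set.update_eq_append_filter]
    have hfil : (PySem.Set.ofList newKs).filter (fun y => !(PySem.Set.contains keys y)) = [] := by
      rw [List.filter_eq_nil_iff]
      intro a ha
      have hank : a ∈ newKs := (PySem.Set.mem_ofList _ _).mp ha
      have hak : a ∈ keys := ((hmemNew' a).mp hank).1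
      simp [PySem.Set.contains_eq_listContains, hak]
    rw [hfil]
    simp
  have hd'val : ∀ k ∈ keys,
      (newKs.foldl (fun d k => d.modify k 0 (fun v => v - 1)) d).getD k 0 =
        if (u+1) ≤ MxN keys k then -(((u+1 : Nat) : Int) + 1)
        else -1 - (MxN keys k : Int) := by
    intro k hk
    rw [getD_foldl_modify_sub_one newKs d k]
    by_cases hin : k ∈ newKs
    · have hcnt : newKs.count k = 1 := List.count_eq_one_of_mem hnewnd hin
      obtain ⟨_, hle⟩ := (hmemNew' k).mp hin
      rw [hval k hk, if_pos (by omega : u ≤ MxN keys k), hcnt, if_pos hle]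
      push_cast; ring
    · have hcnt : newKs.count k = 0 := List.count_eq_zero_of_not_mem hin
      have hnle : ¬ ((u+1) ≤ MxN keys k) := fun hle => hin ((hmemNew' k).mpr ⟨hk, hle⟩)
      rw [hcnt, hval k hk, if_neg hnle]
      by_cases hu : u ≤ MxN keys k
      · rw [if_pos hu]
        have hMu : MxN keys k = u := by omega
        rw [hMu]; push_cast; ring
      · rw [if_neg hu]; push_cast; ring
  rw [hr]
  exact ⟨hnewnd, hmemNew', by rw [hd2]; exact hd'keys, by rw [hd2]; exact hd'val⟩

-- loop correctness
lemma inv_final (keys : List (List String)) (hndk : keys.Nodup) (u : Nat)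
    (d : PySem.Dict (List String) Int) (h : InvA keys u [] d) :
    d.items = keys.map (fun k => (k, -1 - (MxN keys k : Int))) := by
  obtain ⟨_, hmem, hkeys, hval⟩ := h
  rw [PySem.Dict.items_eq_map_keys d (by rw [hkeys]; exact hndk) 0, hkeys]
  apply List.map_congr_left
  intro k hk
  have hnot : ¬ (u ≤ MxN keys k) := by
    intro hle
    have := (hmem k).mpr ⟨hk, hle⟩
    simp at this
  rw [hval k hk, if_neg hnot]

lemma aLoop_correct (keys : List (List String)) (hndk : keys.Nodup) :
    ∀ (fuel u : Nat) (ks : List (List String)) (d : PySem.Dict (List String) Int),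
      InvA keys u ks d → maxLenA keys + 1 ≤ u + fuel →
      (aLoop fuel ks d).items = keys.map (fun k => (k, -1 - (MxN keys k : Int))) := by
  intro fuel
  induction fuel with
  | zero =>
    intro u ks d hinv hb
    cases ks with
    | nil => exact inv_final keys hndk u d hinv
    | cons k0 ks' =>
      exfalso
      have hk0 := (hinv.2.1 k0).mp (by simp)
      have := MxN_le_maxLenA keys k0
      omega
  | succ fuel ih =>
    intro u ks d hinv hb
    cases ks with
    | nil => exact inv_final keys hndk u d hinv
    | cons k0 ks' =>
      show (aLoop fuel (aRound d (k0 :: ks')).1 (aRound d (k0 :: ks')).2).items = _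
      exact ih (u + 1) _ _ (round_inv keys u (k0 :: ks') d hinv) (by omega)

-- ===== VERDICT (by name: the statement is the Claim_ definition above) =====
theorem get_key_indices_py_spec : Claim_equal_get_key_indices_py := by
  unfold Claim_equal_get_key_indices_py
  intro keys _ hpre
  unfold Spec_get_key_indices_py Pre_get_key_indices_py at *
  unfold get_key_indices_py
  rw [alt_eq keys hpre]
  apply aLoop_correct keys hpre (maxLenA keys + 2) 0 keys _ _ (by omega)
  refine ⟨hpre, ?_, ?_, ?_⟩
  · intro k; simp
  · rw [PySem.Dict.keys_foldl_insert]
    simp [PySem.Set.update_nil_left, PySem.Set.ofList_eq_self_of_nodup keys hpre]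
  · intro k hk
    have hitems := fresh_insert_items keys hpre (fun _ => (-1 : Int))
    have hknd : (keys.foldl (fun d k => d.insert k (-1 : Int)) PySem.Dict.empty).keys.Nodup := by
      rw [PySem.Dict.keys_foldl_insert]
      simp [PySem.Set.update_nil_left, PySem.Set.ofList_eq_self_of_nodup keys hpre]
      exact hpre
    have : ((k, (-1 : Int)) ∈
        (keys.foldl (fun d k => d.insert k (-1 : Int)) PySem.Dict.empty).items) := by
      rw [hitems]; exact List.mem_map.mpr ⟨k, hk, rfl⟩
    rw [PySem.Dict.getD_of_mem_items _ this hknd 0]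
    simp
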